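-- pv_equiv track=rewrite | github.com/wjwitek/ASD2021L | Kolokwium II/optymalna_kolejność_sumowania.py | opt_sum
-- ===== SOURCE A (Python) =====
-- def opt_sum(tab):
--     n = len(tab)
--     f = [[-1 for _ in range(n)] for _ in range(n)]
--     s = [[-1 for _ in range(n)] for _ in range(n)]
--     for i in range(n):
--         f[i][i] = 0
--         s[i][i] = tab[i]
--     for i in range(n):
--         for j in range(i + 1, n):
--             s[i][j] = s[i][j - 1] + tab[j]
--     for k in range(1, n):
--         i = 0
--         j = i + k
--         while i < n and j < n:
--             f[i][j] = min(max(f[i+1][j], abs(s[i + 1][j] + tab[i])), max(f[i][j - 1], abs(s[i][j - 1] + tab[j])))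
--             i += 1
--             j += 1
--     return f[0][n - 1]
-- ===== SOURCE B (Python) =====
-- def opt_sum(tab):
--     n = len(tab)
--     pref = [0]
--     for x in tab:
--         pref.append(pref[-1] + x)
--     memo = {}
--
--     def rec(i, j):
--         if i == j:
--             return 0
--         if (i, j) in memo:
--             return memo[(i, j)]
--         total = abs(pref[j + 1] - pref[i])
--         res = min(max(rec(i + 1, j), total), max(rec(i, j - 1), total))
--         memo[(i, j)] = res
--         return res
--
--     return rec(0, n - 1)
-- ===== Notes on version B (the rewrite author's own statement) =====
-- stated objective: alternative
-- what changed: Replaces A's three staged passes over two eagerly-filled n-by-n tables (diagonal while-loop fill) with demand-driven top-down memoized recursion rec(i,j) over a 1-D prefix-sum array (same recurrence evaluated lazily; O(n) auxiliary arrays besides the memo dict).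
import Mathlib
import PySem

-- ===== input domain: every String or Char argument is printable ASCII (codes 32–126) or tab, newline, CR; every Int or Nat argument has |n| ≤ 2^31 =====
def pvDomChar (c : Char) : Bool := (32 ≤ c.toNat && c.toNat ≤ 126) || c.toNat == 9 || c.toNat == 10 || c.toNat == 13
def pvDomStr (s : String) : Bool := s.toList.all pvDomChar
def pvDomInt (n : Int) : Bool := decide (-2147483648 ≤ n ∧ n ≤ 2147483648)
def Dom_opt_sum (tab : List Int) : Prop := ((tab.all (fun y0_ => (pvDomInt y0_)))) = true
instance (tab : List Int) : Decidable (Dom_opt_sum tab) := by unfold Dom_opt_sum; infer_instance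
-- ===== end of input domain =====

-- B replaces A's three staged table-filling loops (two eagerly built n×n tables and a diagonal
-- while-loop sweep) with demand-driven top-down memoized recursion over a 1-D prefix-sum array
-- (different decomposition, O(n) auxiliary space besides the memo); return values agree on Pre_.

-- ===== PORT A =====
-- 2-D table access/update, Python f[i][j] (all accesses in range on Pre_; default is the
-- initial filler -1, never read out of range inside the loops)
def get2 (t : List (List Int)) (i j : Nat) : Int := (t.getD i []).getD j (-1)
def set2 (t : List (List Int)) (i j : Nat) (v : Int) : List (List Int) :=
  t.set i ((t.getD i []).set j v)

-- the 'while i < n and j < n' loop of A's k-th diagonal pass; fuel n suffices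
def diagLoop (tab : List Int) (s : List (List Int)) (n : Nat) :
    Nat → List (List Int) → Nat → Nat → List (List Int)
  | 0, f, _, _ => f
  | fuel+1, f, i, j =>
    if i < n ∧ j < n then
      let v := min (max (get2 f (i+1) j) |get2 s (i+1) j + tab.getD i 0|)
                   (max (get2 f i (j-1)) |get2 s i (j-1) + tab.getD j 0|)
      diagLoop tab s n fuel (set2 f i j v) (i+1) (j+1)
    else f

-- the three fill loops of A, one def per loop (same state, same order)
def stage1 (tab : List Int) (n : Nat) : List (List Int) × List (List Int) :=
  (List.range n).foldl
    (fun (p : List (List Int) × List (List Int)) i =>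
      (set2 p.1 i i 0, set2 p.2 i i (tab.getD i 0)))
    (List.replicate n (List.replicate n (-1)), List.replicate n (List.replicate n (-1)))

def stage2 (tab : List Int) (n : Nat) (s : List (List Int)) : List (List Int) :=
  (List.range n).foldl
    (fun s i => (List.range' (i+1) (n - (i+1))).foldl
      (fun s j => set2 s i j (get2 s i (j-1) + tab.getD j 0)) s) s

def stage3 (tab : List Int) (n : Nat) (s2 f : List (List Int)) : List (List Int) :=
  (List.range' 1 (n-1)).foldl (fun f k => diagLoop tab s2 n n f 0 k) f

def opt_sum (tab : List Int) : Int :=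
  let n := tab.length
  let fs1 := stage1 tab n
  let s2 := stage2 tab n fs1.2
  let f3 := stage3 tab n s2 fs1.1
  get2 f3 0 (n-1)

-- ===== PORT B =====
-- pref.append(pref[-1] + x)
def prefStep (p : List Int) (x : Int) : List Int := p ++ [p.getD (p.length - 1) 0 + x]

def prefList (tab : List Int) : List Int := tab.foldl prefStep [0]

-- Source B's rec(i, j), the memoized recursion, with the memo dict threaded through; the fuel
-- argument only makes the recursion structurally terminating (the top call passes fuel = n,
-- which is never exhausted on Pre_: each nested call shrinks j - i by one)
def recB (pref : List Int) : Nat → Nat → Nat → PySem.Dict (Nat × Nat) Int →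
    Int × PySem.Dict (Nat × Nat) Int
  | 0, _, _, m => (0, m)
  | fuel+1, i, j, m =>
    if i = j then (0, m)
    else
      match m.get? (i, j) with
      | some v => (v, m)
      | none =>
        let total := |pref.getD (j+1) 0 - pref.getD i 0|
        let a := recB pref fuel (i+1) j m
        let b := recB pref fuel i (j-1) a.2
        let res := min (max a.1 total) (max b.1 total)
        (res, b.2.insert (i, j) res)

def opt_sum_alt (tab : List Int) : Int :=
  let n := tab.length
  let pref := prefList tab
  (recB pref n 0 (n-1) PySem.Dict.empty).1

-- ===== PRECONDITION & SPEC =====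
-- Pre_ excludes only the empty list, on which A raises IndexError (f[0][-1] on the empty f).
def Pre_opt_sum (tab : List Int) : Prop := tab ≠ []
instance (tab : List Int) : Decidable (Pre_opt_sum tab) := by unfold Pre_opt_sum; infer_instance
def pvWitness_opt_sum : List Int := [3, -1, 2]

def Spec_opt_sum (tab : List Int) (out : Int) : Prop := out = opt_sum_alt tab
instance (tab : List Int) (out : Int) : Decidable (Spec_opt_sum tab out) := by unfold Spec_opt_sum; infer_instance

-- ===== CLAIM (what is proved, stated in full; the proofs are below) =====
def Claim_equal_opt_sum : Prop := ∀ (tab : List Int), Dom_opt_sum tab → Pre_opt_sum tab → Spec_opt_sum tab (opt_sum tab)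

-- ===== LEMMAS AND PROOFS =====

-- sum of tab[i..i+d] (A's s[i][i+d]), in A's accumulation order
def Sg (tab : List Int) (i : Nat) : Nat → Int
  | 0 => tab.getD i 0
  | d+1 => Sg tab i d + tab.getD (i+d+1) 0

-- the DP value f[i][i+d], in collapsed max-of-min form
def Fv (tab : List Int) : Nat → Nat → Int
  | 0, _ => 0
  | d+1, i => max (min (Fv tab d (i+1)) (Fv tab d i)) |Sg tab i (d+1)|

lemma sg_shift (tab : List Int) (i : Nat) : ∀ d, Sg tab (i+1) d + tab.getD i 0 = Sg tab i (d+1) := by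
  intro d
  induction d with
  | zero => simp [Sg]; ring
  | succ d ih =>
      show Sg tab (i+1) d + tab.getD (i+1+d+1) 0 + tab.getD i 0 = Sg tab i (d+1) + tab.getD (i+(d+1)+1) 0
      have : i+1+d+1 = i+(d+1)+1 := by omega
      rw [this]; linarith [ih]

lemma minmax (a b c : Int) : min (max a c) (max b c) = max (min a b) c := by
  rcases le_total a b with h | h <;> rcases le_total a c with h1 | h1 <;> rcases le_total b c with h2 | h2 <;>
    simp [max_def, min_def] <;> omega

def Rect (n : Nat) (t : List (List Int)) : Prop := t.length = n ∧ ∀ r ∈ t, r.length = n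

lemma rect_replicate (n : Nat) : Rect n (List.replicate n (List.replicate n (-1 : Int))) := by
  constructor
  · simp
  · intro r hr; simp [List.eq_of_mem_replicate hr]

lemma get2_replicate (n i j : Nat) : get2 (List.replicate n (List.replicate n (-1 : Int))) i j = -1 := by
  simp [get2, List.getD, List.getElem?_replicate]
  by_cases h : i < n <;> simp [h]

lemma rect_getD {n : Nat} {t : List (List Int)} (h : Rect n t) {i : Nat} (hi : i < n) :
    (t.getD i []).length = n := by
  obtain ⟨h1, h2⟩ := h
  have hil : i < t.length := by omega
  rw [List.getD_eq_getElem _ _ hil]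
  exact h2 _ (List.getElem_mem hil)

lemma rect_set2 {n : Nat} {t : List (List Int)} (h : Rect n t) {i : Nat} (hi : i < n) (j : Nat) (v : Int) :
    Rect n (set2 t i j v) := by
  have hrow := rect_getD h hi
  obtain ⟨h1, h2⟩ := h
  refine ⟨by simp [set2, h1], ?_⟩
  intro r hr
  rcases List.mem_or_eq_of_mem_set hr with hm | hm
  · exact h2 r hm
  · subst hm; simpa [List.getD] using hrow

lemma get2_set2_self {t : List (List Int)} {i j : Nat}
    (hi : i < t.length) (hj : j < (t.getD i []).length) (v : Int) :
    get2 (set2 t i j v) i j = v := by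
  have hj' : j < t[i].length := by rwa [List.getD_eq_getElem _ _ hi] at hj
  simp [get2, set2, List.getD, hi]
  rw [List.getElem?_eq_getElem (by simpa using hj')]
  simp

lemma get2_set2_self' {n : Nat} {t : List (List Int)} (h : Rect n t) {i j : Nat}
    (hi : i < n) (hj : j < n) (v : Int) : get2 (set2 t i j v) i j = v :=
  get2_set2_self (h.1 ▸ hi) (by rw [rect_getD h hi]; exact hj) v

lemma get2_set2_ne {t : List (List Int)} {i j a b : Nat} (h : i ≠ a ∨ j ≠ b) (v : Int) :
    get2 (set2 t a b v) i j = get2 t i j := by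
  by_cases hia : i = a
  · subst hia
    have hj : j ≠ b := by tauto
    by_cases hi : i < t.length
    · simp [get2, set2, List.getD, hi, List.getElem?_set_ne (by omega : b ≠ j)]
    · simp [get2, set2, List.getD, hi]
  · simp [get2, set2, List.getD, List.getElem?_set_ne (by omega : a ≠ i)]

lemma stage1_spec (tab : List Int) (n : Nat) : ∀ m, m ≤ n →
    Rect n ((List.range m).foldl
      (fun (p : List (List Int) × List (List Int)) i =>
        (set2 p.1 i i 0, set2 p.2 i i (tab.getD i 0)))
      (List.replicate n (List.replicate n (-1)), List.replicate n (List.replicate n (-1)))).1 ∧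
    Rect n ((List.range m).foldl
      (fun (p : List (List Int) × List (List Int)) i =>
        (set2 p.1 i i 0, set2 p.2 i i (tab.getD i 0)))
      (List.replicate n (List.replicate n (-1)), List.replicate n (List.replicate n (-1)))).2 ∧
    (∀ i j, get2 ((List.range m).foldl
      (fun (p : List (List Int) × List (List Int)) i =>
        (set2 p.1 i i 0, set2 p.2 i i (tab.getD i 0)))
      (List.replicate n (List.replicate n (-1)), List.replicate n (List.replicate n (-1)))).1 i j
        = if i = j ∧ i < m then 0 else -1) ∧
    (∀ i j, get2 ((List.range m).foldl
      (fun (p : List (List Int) × List (List Int)) i =>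
        (set2 p.1 i i 0, set2 p.2 i i (tab.getD i 0)))
      (List.replicate n (List.replicate n (-1)), List.replicate n (List.replicate n (-1)))).2 i j
        = if i = j ∧ i < m then tab.getD i 0 else -1) := by
  intro m
  induction m with
  | zero =>
      intro _
      exact ⟨rect_replicate n, rect_replicate n,
        fun i j => by simp [get2_replicate], fun i j => by simp [get2_replicate]⟩
  | succ m ih =>
      intro hm
      obtain ⟨hf, hs, hfv, hsv⟩ := ih (by omega)
      rw [List.range_succ, List.foldl_append]
      simp only [List.foldl_cons, List.foldl_nil]
      refine ⟨rect_set2 hf (by omega) _ _, rect_set2 hs (by omega) _ _, ?_, ?_⟩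
      · intro i j
        by_cases hij : i = m ∧ j = m
        · obtain ⟨rfl, rfl⟩ := hij
          rw [get2_set2_self' hf (by omega) (by omega)]
          simp
        · rw [get2_set2_ne (by tauto) _, hfv i j]
          by_cases h1 : i = j <;> simp [h1] <;> omega
      · intro i j
        by_cases hij : i = m ∧ j = m
        · obtain ⟨rfl, rfl⟩ := hij
          rw [get2_set2_self' hs (by omega) (by omega)]
          simp
        · rw [get2_set2_ne (by tauto) _, hsv i j]
          by_cases h1 : i = j <;> simp [h1] <;> omega


-- ---- stage 2 (the s table) ----

lemma inner_spec (tab : List Int) (n : Nat) (i : Nat) (hi : i < n) :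
    ∀ c j0 (s : List (List Int)), Rect n s → i < j0 →
      (∀ b, i ≤ b → b < j0 → get2 s i b = Sg tab i (b-i)) →
      j0 + c ≤ n →
      Rect n ((List.range' j0 c).foldl (fun s j => set2 s i j (get2 s i (j-1) + tab.getD j 0)) s) ∧
      (∀ b, i ≤ b → b < j0 + c →
        get2 ((List.range' j0 c).foldl (fun s j => set2 s i j (get2 s i (j-1) + tab.getD j 0)) s) i b
          = Sg tab i (b-i)) ∧
      (∀ a b, a ≠ i →
        get2 ((List.range' j0 c).foldl (fun s j => set2 s i j (get2 s i (j-1) + tab.getD j 0)) s) a b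
          = get2 s a b) ∧
      (∀ b, b < j0 ∨ j0 + c ≤ b →
        get2 ((List.range' j0 c).foldl (fun s j => set2 s i j (get2 s i (j-1) + tab.getD j 0)) s) i b
          = get2 s i b) := by
  intro c
  induction c with
  | zero =>
      intro j0 s hR hij hfill hcn
      simp only [List.range'_zero, List.foldl_nil]
      exact ⟨hR, fun b hb1 hb2 => hfill b hb1 hb2, fun _ _ _ => trivial, fun _ _ => trivial⟩
  | succ c ih =>
      intro j0 s hR hij hfill hcn
      rw [List.range'_succ, List.foldl_cons]
      have hvold : get2 s i (j0-1) = Sg tab i (j0-1-i) := hfill _ (by omega) (by omega)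
      have hval : get2 s i (j0-1) + tab.getD j0 0 = Sg tab i (j0-i) := by
        rw [hvold]
        have h1 : j0 - i = (j0-1-i)+1 := by omega
        rw [h1]
        show _ = Sg tab i (j0-1-i) + tab.getD (i+(j0-1-i)+1) 0
        have h2 : i + (j0-1-i) + 1 = j0 := by omega
        rw [h2]
      have hR1 : Rect n (set2 s i j0 (get2 s i (j0-1) + tab.getD j0 0)) := rect_set2 hR hi _ _
      have hfill1 : ∀ b, i ≤ b → b < j0+1 →
          get2 (set2 s i j0 (get2 s i (j0-1) + tab.getD j0 0)) i b = Sg tab i (b-i) := by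
        intro b hb1 hb2
        by_cases hb : b = j0
        · subst hb; rw [get2_set2_self' hR hi (by omega), hval]
        · rw [get2_set2_ne (by omega) _]; exact hfill b hb1 (by omega)
      obtain ⟨hA, hB, hC, hD⟩ := ih (j0+1) _ hR1 (by omega) hfill1 (by omega)
      refine ⟨hA, ?_, ?_, ?_⟩
      · intro b hb1 hb2
        exact hB b hb1 (by omega)
      · intro a b ha
        rw [hC a b ha, get2_set2_ne (by omega) _]
      · intro b hb
        rw [hD b (by omega), get2_set2_ne (by omega) _]

-- invariant of the s table after the first m outer iterations of stage 2
def Qs (tab : List Int) (n m : Nat) (s : List (List Int)) : Prop :=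
  Rect n s ∧ ∀ a b, get2 s a b =
    if a ≤ b ∧ b < n ∧ a < n ∧ (a < m ∨ a = b) then Sg tab a (b-a) else -1

lemma stage2_spec (tab : List Int) (n : Nat) :
    ∀ m (s : List (List Int)), m ≤ n → Qs tab n 0 s →
      Qs tab n m ((List.range m).foldl
        (fun s i => (List.range' (i+1) (n - (i+1))).foldl
          (fun s j => set2 s i j (get2 s i (j-1) + tab.getD j 0)) s) s) := by
  intro m
  induction m with
  | zero => intro s _ h0; simpa using h0
  | succ m ih =>
      intro s hm h0
      rw [List.range_succ, List.foldl_append, List.foldl_cons, List.foldl_nil]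
      obtain ⟨hR, hv⟩ := ih s (by omega) h0
      have hm' : m < n := by omega
      have hfill : ∀ b, m ≤ b → b < m+1 →
          get2 ((List.range m).foldl
            (fun s i => (List.range' (i+1) (n - (i+1))).foldl
              (fun s j => set2 s i j (get2 s i (j-1) + tab.getD j 0)) s) s) m b = Sg tab m (b-m) := by
        intro b hb1 hb2
        have hb : b = m := by omega
        rw [hb, hv m m]
        simp [hm']
      obtain ⟨hA, hB, hC, hD⟩ := inner_spec tab n m hm' (n-(m+1)) (m+1) _ hR (by omega) hfill (by omega)
      refine ⟨hA, ?_⟩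
      intro a b
      by_cases ha : a = m
      · rw [ha]
        by_cases hbb : b = m
        · rw [hbb, hD m (by omega), hv m m, if_pos (by omega), if_pos (by omega)]
        · by_cases hb : m ≤ b ∧ b < n
          · rw [hB b (by omega) (by omega), if_pos (by omega)]
          · rw [if_neg (by omega), hD b (by omega), hv m b, if_neg (by omega)]
      · rw [hC a b ha, hv a b]
        have : (a ≤ b ∧ b < n ∧ a < n ∧ (a < m ∨ a = b)) ↔ (a ≤ b ∧ b < n ∧ a < n ∧ (a < m+1 ∨ a = b)) := by omega
        rw [if_congr this rfl rfl]

-- ---- stage 3 (the f table) ----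

lemma diag_spec (tab : List Int) (n : Nat) (s2 : List (List Int))
    (hs : ∀ a b, a ≤ b → b < n → get2 s2 a b = Sg tab a (b-a)) (k : Nat) (hk : 1 ≤ k) :
    ∀ fuel i (f : List (List Int)), Rect n f →
      (∀ a b, get2 f a b =
        if a ≤ b ∧ b < n ∧ (b - a < k ∨ (b - a = k ∧ a < i)) then Fv tab (b-a) a else -1) →
      n ≤ fuel + i →
      Rect n (diagLoop tab s2 n fuel f i (i+k)) ∧
      (∀ a b, get2 (diagLoop tab s2 n fuel f i (i+k)) a b =
        if a ≤ b ∧ b < n ∧ b - a ≤ k then Fv tab (b-a) a else -1) := by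
  intro fuel
  induction fuel with
  | zero =>
      intro i f hR hf hn
      refine ⟨hR, ?_⟩
      intro a b
      rw [diagLoop, hf a b]
      have : (a ≤ b ∧ b < n ∧ (b - a < k ∨ (b - a = k ∧ a < i))) ↔ (a ≤ b ∧ b < n ∧ b - a ≤ k) := by omega
      rw [if_congr this rfl rfl]
  | succ fuel ih =>
      intro i f hR hf hn
      rw [diagLoop]
      by_cases hc : i < n ∧ i + k < n
      · rw [if_pos hc]
        have e1 : i + k - (i+1) = k - 1 := by omega
        have e2 : i + k - 1 - i = k - 1 := by omega
        have hf1 : get2 f (i+1) (i+k) = Fv tab (k-1) (i+1) := by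
          rw [hf, if_pos (by omega), e1]
        have hf2 : get2 f i (i+k-1) = Fv tab (k-1) i := by
          rw [hf, if_pos (by omega), e2]
        have hs1 : get2 s2 (i+1) (i+k) = Sg tab (i+1) (k-1) := by
          rw [hs _ _ (by omega) (by omega), e1]
        have hs2 : get2 s2 i (i+k-1) = Sg tab i (k-1) := by
          rw [hs _ _ (by omega) (by omega), e2]
        have hv : min (max (get2 f (i+1) (i+k)) |get2 s2 (i+1) (i+k) + tab.getD i 0|)
                      (max (get2 f i (i+k-1)) |get2 s2 i (i+k-1) + tab.getD (i+k) 0|)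
                    = Fv tab k i := by
          rw [hf1, hf2, hs1, hs2, sg_shift]
          have e3 : Sg tab i (k-1) + tab.getD (i+k) 0 = Sg tab i ((k-1)+1) := by
            show _ = Sg tab i (k-1) + tab.getD (i+(k-1)+1) 0
            have : i + (k-1) + 1 = i + k := by omega
            rw [this]
          rw [e3, minmax]
          have e4 : k - 1 + 1 = k := by omega
          rw [e4]
          obtain ⟨k', rfl⟩ : ∃ k', k = k' + 1 := ⟨k-1, by omega⟩
          simp only [Nat.add_sub_cancel]
          rfl
        rw [hv]
        have hR' : Rect n (set2 f i (i+k) (Fv tab k i)) := rect_set2 hR hc.1 _ _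
        have hf' : ∀ a b, get2 (set2 f i (i+k) (Fv tab k i)) a b =
            if a ≤ b ∧ b < n ∧ (b - a < k ∨ (b - a = k ∧ a < i+1)) then Fv tab (b-a) a else -1 := by
          intro a b
          by_cases hab : a = i ∧ b = i + k
          · obtain ⟨rfl, rfl⟩ := hab
            rw [get2_set2_self' hR hc.1 hc.2]
            rw [if_pos (by omega)]
            congr 1
            omega
          · rw [get2_set2_ne (by omega) _, hf a b]
            have : (a ≤ b ∧ b < n ∧ (b - a < k ∨ (b - a = k ∧ a < i))) ↔
                   (a ≤ b ∧ b < n ∧ (b - a < k ∨ (b - a = k ∧ a < i+1))) := by omega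
            rw [if_congr this rfl rfl]
        have := ih (i+1) _ hR' hf' (by omega)
        have e5 : i + 1 + k = i + k + 1 := by omega
        rw [e5] at this
        exact this
      · rw [if_neg hc]
        refine ⟨hR, ?_⟩
        intro a b
        rw [hf a b]
        have hik : n ≤ i + k ∨ n ≤ i := by omega
        have : (a ≤ b ∧ b < n ∧ (b - a < k ∨ (b - a = k ∧ a < i))) ↔ (a ≤ b ∧ b < n ∧ b - a ≤ k) := by
          omega
        rw [if_congr this rfl rfl]

lemma stage3_spec (tab : List Int) (n : Nat) (s2 : List (List Int))
    (hs : ∀ a b, a ≤ b → b < n → get2 s2 a b = Sg tab a (b-a)) :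
    ∀ c k (f : List (List Int)), 1 ≤ k → Rect n f →
      (∀ a b, get2 f a b = if a ≤ b ∧ b < n ∧ b - a < k then Fv tab (b-a) a else -1) →
      (∀ a b, get2 ((List.range' k c).foldl (fun f k => diagLoop tab s2 n n f 0 k) f) a b =
        if a ≤ b ∧ b < n ∧ b - a < k + c then Fv tab (b-a) a else -1) := by
  intro c
  induction c with
  | zero =>
      intro k f hk hR hf
      simpa using hf
  | succ c ih =>
      intro k f hk hR hf
      rw [List.range'_succ, List.foldl_cons]
      have hf0 : ∀ a b, get2 f a b =
          if a ≤ b ∧ b < n ∧ (b - a < k ∨ (b - a = k ∧ a < 0)) then Fv tab (b-a) a else -1 := by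
        intro a b
        rw [hf a b]
        have : (a ≤ b ∧ b < n ∧ b - a < k) ↔ (a ≤ b ∧ b < n ∧ (b - a < k ∨ (b - a = k ∧ a < 0))) := by omega
        rw [if_congr this rfl rfl]
      have hd := diag_spec tab n s2 hs k hk n 0 f hR hf0 (by omega)
      rw [show 0 + k = k from by omega] at hd
      obtain ⟨hR', hf'⟩ := hd
      have hf'' : ∀ a b, get2 (diagLoop tab s2 n n f 0 k) a b =
          if a ≤ b ∧ b < n ∧ b - a < k + 1 then Fv tab (b-a) a else -1 := by
        intro a b
        rw [hf' a b]
        have : (a ≤ b ∧ b < n ∧ b - a ≤ k) ↔ (a ≤ b ∧ b < n ∧ b - a < k + 1) := by omega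
        rw [if_congr this rfl rfl]
      have := ih (k+1) _ (by omega) hR' hf''
      intro a b
      rw [this a b]
      have : (a ≤ b ∧ b < n ∧ b - a < k + 1 + c) ↔ (a ≤ b ∧ b < n ∧ b - a < k + (c+1)) := by omega
      rw [if_congr this rfl rfl]

-- ---- A's result ----

lemma stage1_full (tab : List Int) (n : Nat) :
    Rect n (stage1 tab n).1 ∧ Rect n (stage1 tab n).2 ∧
    (∀ i j, get2 (stage1 tab n).1 i j = if i = j ∧ i < n then 0 else -1) ∧
    (∀ i j, get2 (stage1 tab n).2 i j = if i = j ∧ i < n then tab.getD i 0 else -1) := by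
  have h := stage1_spec tab n n (le_refl n)
  exact h

lemma stage2_full (tab : List Int) (n : Nat) (h0 : Qs tab n 0 (stage1 tab n).2) :
    Qs tab n n (stage2 tab n (stage1 tab n).2) := by
  have h := stage2_spec tab n n (stage1 tab n).2 (le_refl n) h0
  exact h

lemma stage3_full (tab : List Int) (n : Nat) (s2 f : List (List Int))
    (hs : ∀ a b, a ≤ b → b < n → get2 s2 a b = Sg tab a (b-a))
    (hR : Rect n f)
    (hf : ∀ a b, get2 f a b = if a ≤ b ∧ b < n ∧ b - a < 1 then Fv tab (b-a) a else -1) :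
    ∀ a b, get2 (stage3 tab n s2 f) a b =
      if a ≤ b ∧ b < n ∧ b - a < 1 + (n-1) then Fv tab (b-a) a else -1 := by
  have h := stage3_spec tab n s2 hs (n-1) 1 f (le_refl 1) hR hf
  exact h

lemma optA (tab : List Int) (h : tab ≠ []) : opt_sum tab = Fv tab (tab.length - 1) 0 := by
  have hn : 1 ≤ tab.length := by
    cases tab with
    | nil => simp at h
    | cons x xs => simp
  obtain ⟨hRf1, hRs1, hf1, hs1⟩ := stage1_full tab tab.length
  have hQ0 : Qs tab tab.length 0 (stage1 tab tab.length).2 := by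
    refine ⟨hRs1, ?_⟩
    intro a b
    rw [hs1 a b]
    by_cases h1 : a = b ∧ a < tab.length
    · obtain ⟨rfl, h2⟩ := h1
      rw [if_pos (by omega), if_pos (by omega)]
      simp [Sg]
    · rw [if_neg (by omega), if_neg (by omega)]
  obtain ⟨hRs2, hs2⟩ := stage2_full tab tab.length hQ0
  have hs2' : ∀ a b, a ≤ b → b < tab.length →
      get2 (stage2 tab tab.length (stage1 tab tab.length).2) a b = Sg tab a (b-a) := by
    intro a b h1 h2
    rw [hs2 a b, if_pos (by omega)]
  have hf1' : ∀ a b, get2 (stage1 tab tab.length).1 a b =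
      if a ≤ b ∧ b < tab.length ∧ b - a < 1 then Fv tab (b-a) a else -1 := by
    intro a b
    rw [hf1 a b]
    by_cases h1 : a = b ∧ a < tab.length
    · obtain ⟨rfl, h2⟩ := h1
      rw [if_pos (by omega), if_pos (by omega)]
      simp [Fv]
    · rw [if_neg (by omega), if_neg (by omega)]
  have h3 := stage3_full tab tab.length _ _ hs2' hRf1 hf1' 0 (tab.length - 1)
  show get2 (stage3 tab tab.length (stage2 tab tab.length (stage1 tab tab.length).2)
        (stage1 tab tab.length).1) 0 (tab.length - 1) = Fv tab (tab.length - 1) 0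
  rw [h3, if_pos (by omega)]
  simp

-- ---- B's side ----

def Ps (a : Int) : List Int → List Int
  | [] => []
  | x :: xs => (a+x) :: Ps (a+x) xs

lemma getD_concat : ∀ (p : List Int) (v : Int), (p ++ [v]).getD p.length 0 = v := by
  intro p v
  induction p with
  | nil => simp
  | cons x xs ih => simpa using ih

lemma pref_fold : ∀ (l p : List Int) (a : Int), p ≠ [] → p.getD (p.length-1) 0 = a →
    l.foldl prefStep p = p ++ Ps a l := by
  intro l
  induction l with
  | nil => intro p a _ _; simp [Ps]
  | cons x xs ih =>
      intro p a hp ha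
      rw [List.foldl_cons]
      have hstep : prefStep p x = p ++ [a + x] := by
        unfold prefStep; rw [ha]
      rw [hstep, ih (p ++ [a+x]) (a+x) (by simp) (by simpa using getD_concat p (a+x))]
      simp [Ps]

lemma prefList_eq (tab : List Int) : prefList tab = 0 :: Ps 0 tab := by
  unfold prefList
  rw [pref_fold tab [0] 0 (by simp) (by simp)]
  simp

lemma Ps_getD : ∀ (l : List Int) (a : Int) (m : Nat), m < l.length →
    (Ps a l).getD m 0 = a + (l.take (m+1)).sum := by
  intro l
  induction l with
  | nil => intro a m hm; simp at hm
  | cons x xs ih =>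
      intro a m hm
      cases m with
      | zero => simp [Ps]
      | succ m =>
          rw [show Ps a (x :: xs) = (a+x) :: Ps (a+x) xs from rfl]
          have : ((a+x) :: Ps (a+x) xs).getD (m+1) 0 = (Ps (a+x) xs).getD m 0 := by simp
          rw [this, ih (a+x) m (by simpa using hm)]
          simp [List.take_succ_cons]
          ring

lemma pref_getD (tab : List Int) (m : Nat) (hm : m ≤ tab.length) :
    (prefList tab).getD m 0 = (tab.take m).sum := by
  rw [prefList_eq]
  cases m with
  | zero => simp
  | succ m =>
      have : ((0:Int) :: Ps 0 tab).getD (m+1) 0 = (Ps 0 tab).getD m 0 := by simp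
      rw [this, Ps_getD tab 0 m (by omega)]
      simp

lemma sum_diff (tab : List Int) : ∀ (d i : Nat), i + d + 1 ≤ tab.length →
    (tab.take (i+d+1)).sum - (tab.take i).sum = Sg tab i d := by
  intro d
  induction d with
  | zero =>
      intro i hi
      have h1 : i < tab.length := by omega
      rw [List.sum_take_succ tab i h1]
      show _ = tab.getD i 0
      rw [List.getD_eq_getElem tab 0 h1]
      ring
  | succ d ih =>
      intro i hi
      have h1 : i + d + 1 < tab.length := by omega
      have e : i + (d+1) + 1 = (i+d+1) + 1 := by omega
      rw [e, List.sum_take_succ tab (i+d+1) h1]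
      show _ = Sg tab i d + tab.getD (i+d+1) 0
      rw [List.getD_eq_getElem tab 0 h1, ← ih i (by omega)]
      ring

-- rec(i, i+d)'s value, written over the prefix array exactly as recB computes it
def Gv (pref : List Int) : Nat → Nat → Int
  | 0, _ => 0
  | d+1, i => min (max (Gv pref d (i+1)) |pref.getD (i+d+2) 0 - pref.getD i 0|)
                  (max (Gv pref d i) |pref.getD (i+d+2) 0 - pref.getD i 0|)

-- a memo is good when every stored entry is the value of the corresponding rec call
def GoodMemo (pref : List Int) (m : PySem.Dict (Nat × Nat) Int) : Prop :=
  ∀ a b v, m.get? (a, b) = some v → v = Gv pref (b - a) a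

lemma recB_spec (pref : List Int) : ∀ (fuel i j : Nat) (m : PySem.Dict (Nat × Nat) Int),
    i ≤ j → j - i < fuel → GoodMemo pref m →
    (recB pref fuel i j m).1 = Gv pref (j - i) i ∧ GoodMemo pref (recB pref fuel i j m).2 := by
  intro fuel
  induction fuel with
  | zero => intro i j m _ hfu _; omega
  | succ fuel ih =>
      intro i j m hij hfu hm
      rw [recB]
      by_cases he : i = j
      · subst he
        simp only [if_pos rfl]
        exact ⟨by simp [Gv], hm⟩
      · rw [if_neg he]
        have hlt : i < j := by omega
        cases hg : m.get? (i, j) with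
        | some v =>
            exact ⟨hm i j v hg, hm⟩
        | none =>
            simp only
            obtain ⟨ha1, ha2⟩ := ih (i+1) j m (by omega) (by omega) hm
            obtain ⟨hb1, hb2⟩ := ih i (j-1) (recB pref fuel (i+1) j m).2 (by omega) (by omega) ha2
            have hval : min (max (recB pref fuel (i+1) j m).1 |pref.getD (j+1) 0 - pref.getD i 0|)
                (max (recB pref fuel i (j-1) (recB pref fuel (i+1) j m).2).1
                  |pref.getD (j+1) 0 - pref.getD i 0|) = Gv pref (j - i) i := by
              simp only [ha1, hb1]
              obtain ⟨d, rfl⟩ : ∃ d, j = i + (d + 1) := ⟨j - i - 1, by omega⟩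
              have e1 : i + (d+1) - (i+1) = d := by omega
              have e2 : i + (d+1) - 1 - i = d := by omega
              have e3 : i + (d+1) - i = d + 1 := by omega
              have e4 : i + (d+1) + 1 = i + d + 2 := by omega
              rw [e1, e2, e3, e4]
              rfl
            constructor
            · exact hval
            · intro a b v hv
              by_cases hab : (a, b) = (i, j)
              · obtain ⟨rfl, rfl⟩ := Prod.ext_iff.mp hab
                rw [PySem.Dict.get?_insert_self] at hv
                simp only [Option.some.injEq] at hv
                subst hv
                exact hval
              · rw [PySem.Dict.get?_insert_of_ne _ _ hab] at hv
                exact hb2 a b v hv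

lemma Gv_eq_Fv (tab : List Int) : ∀ (d i : Nat), i + d + 1 ≤ tab.length →
    Gv (prefList tab) d i = Fv tab d i := by
  intro d
  induction d with
  | zero => intro i _; rfl
  | succ d ih =>
      intro i hi
      show min (max (Gv (prefList tab) d (i+1)) |(prefList tab).getD (i+d+2) 0 - (prefList tab).getD i 0|)
               (max (Gv (prefList tab) d i) |(prefList tab).getD (i+d+2) 0 - (prefList tab).getD i 0|)
           = Fv tab (d+1) i
      rw [ih (i+1) (by omega), ih i (by omega)]
      rw [pref_getD tab (i+d+2) (by omega), pref_getD tab i (by omega)]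
      rw [show i + d + 2 = i + (d+1) + 1 from by omega, sum_diff tab (d+1) i (by omega)]
      rw [minmax]
      rfl

lemma optB (tab : List Int) (h : tab ≠ []) : opt_sum_alt tab = Fv tab (tab.length - 1) 0 := by
  have hn : 1 ≤ tab.length := by
    cases tab with
    | nil => simp at h
    | cons x xs => simp
  have hm0 : GoodMemo (prefList tab) PySem.Dict.empty := by
    intro a b v hv
    simp [PySem.Dict.get?_empty] at hv
  obtain ⟨h1, _⟩ := recB_spec (prefList tab) tab.length 0 (tab.length - 1)
    PySem.Dict.empty (by omega) (by omega) hm0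
  show (recB (prefList tab) tab.length 0 (tab.length - 1) PySem.Dict.empty).1 = _
  rw [h1]
  simp only [Nat.sub_zero]
  exact Gv_eq_Fv tab (tab.length - 1) 0 (by omega)

-- ===== VERDICT (by name: the statement is the Claim_ definition above) =====
theorem opt_sum_spec : Claim_equal_opt_sum := by
  intro tab _ hpre
  unfold Spec_opt_sum
  rw [optA tab hpre, optB tab hpre]
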